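-- pv_equiv track=rewrite | github.com/clkruse/clkruse.github.io | islands/pipeline/extract_vessels_ais.py | month_iter
-- ===== SOURCE A (Python) =====
-- def month_iter(start: tuple[int, int], end: tuple[int, int]):
--     y, m = start
--     ey, em = end
--     while (y, m) <= (ey, em):
--         yield y, m
--         m += 1
--         if m == 13:
--             m = 1
--             y += 1
-- ===== SOURCE B (Python) =====
-- def month_iter(start: tuple[int, int], end: tuple[int, int]):
--     # Arithmetic decoding of a single absolute month index instead of a
--     # carry-on-13 mutable loop.
--     s = start[0] * 12 + start[1] - 1
--     e = end[0] * 12 + end[1] - 1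
--     for i in range(s, e + 1):
--         yield i // 12, i % 12 + 1
-- ===== Notes on version B (the rewrite author's own statement) =====
-- stated objective: alternative
-- what changed: Replaces A's mutable (year,month) loop with carry at month 13 by a single range over absolute month indices decoded with divmod arithmetic.
-- outside the precondition, e.g. on month_iter((0, 0), (0, 0)): A returns [(0, 0)], B returns [(-1, 12)]; on month_iter((0, 12), (0, 13)): A returns [(0, 12)], B returns [(0, 12), (1, 1)]
import Mathlib
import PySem

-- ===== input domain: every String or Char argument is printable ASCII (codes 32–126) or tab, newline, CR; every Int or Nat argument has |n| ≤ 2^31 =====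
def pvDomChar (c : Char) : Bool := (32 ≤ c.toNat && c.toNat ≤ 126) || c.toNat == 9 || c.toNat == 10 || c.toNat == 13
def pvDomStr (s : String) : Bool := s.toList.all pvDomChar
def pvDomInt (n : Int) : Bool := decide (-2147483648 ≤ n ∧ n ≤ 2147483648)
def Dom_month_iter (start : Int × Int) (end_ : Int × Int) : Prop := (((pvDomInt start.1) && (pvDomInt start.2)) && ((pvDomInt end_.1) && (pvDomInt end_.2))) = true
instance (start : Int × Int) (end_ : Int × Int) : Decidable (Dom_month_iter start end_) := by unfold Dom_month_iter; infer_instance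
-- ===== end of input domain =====

-- B replaces A's mutable (year,month) loop with carry at month 13 by one range over
-- absolute month indices decoded arithmetically (alternative decomposition, same cost).


-- ===== PORT A =====
-- A's while-loop, step for step; the fuel is only a termination bound, exact on Pre_
-- (it equals the number of yields there, and the loop condition is re-checked each step).
def monthLoopA (fuel : Nat) (y m ey em : Int) : List (Int × Int) :=
  match fuel with
  | 0 => []
  | n + 1 =>
    if y < ey ∨ (y = ey ∧ m ≤ em) then    -- (y, m) <= (ey, em)
      (y, m) ::
        (if m + 1 = 13 then monthLoopA n (y + 1) 1 ey em
         else monthLoopA n y (m + 1) ey em)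
    else []

def month_iter (start : Int × Int) (end_ : Int × Int) : List (Int × Int) :=
  monthLoopA (end_.1 * 12 + end_.2 - (start.1 * 12 + start.2) + 1).toNat
    start.1 start.2 end_.1 end_.2

-- ===== PORT B =====
def month_iter_alt (start : Int × Int) (end_ : Int × Int) : List (Int × Int) :=
  let s := start.1 * 12 + start.2 - 1
  let e := end_.1 * 12 + end_.2 - 1
  (PySem.List.pyRange s (e + 1) 1).map
    (fun i => (PySem.Int.floordiv i 12, PySem.Int.mod i 12 + 1))

-- ===== PRECONDITION & SPEC =====
-- Pre_ admits the natural domain of calendar months (1..12 on both endpoints) plus the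
-- region where both the lexicographic and the month-index order make the range empty;
-- the remaining inputs have out-of-range months, on which A either diverges (start
-- month ≥ 13 with start year below end year) or emits/stops-at out-of-range month
-- tuples that are artefacts of the carry-at-13 loop.
def Pre_month_iter (start : Int × Int) (end_ : Int × Int) : Prop :=
  (1 ≤ start.2 ∧ start.2 ≤ 12 ∧ 1 ≤ end_.2 ∧ end_.2 ≤ 12) ∨
  ((end_.1 < start.1 ∨ (end_.1 = start.1 ∧ end_.2 < start.2)) ∧
   end_.1 * 12 + end_.2 < start.1 * 12 + start.2)
instance (start : Int × Int) (end_ : Int × Int) : Decidable (Pre_month_iter start end_) := by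
  unfold Pre_month_iter; infer_instance

def pvWitness_month_iter : (Int × Int) × (Int × Int) := ((2020, 11), (2021, 2))

def Spec_month_iter (start : Int × Int) (end_ : Int × Int) (out : List (Int × Int)) : Prop := out = month_iter_alt start end_
instance (start : Int × Int) (end_ : Int × Int) (out : List (Int × Int)) : Decidable (Spec_month_iter start end_ out) := by unfold Spec_month_iter; infer_instance

-- ===== CLAIM (what is proved, stated in full; the proofs are below) =====
def Claim_equal_month_iter : Prop := ∀ (start : Int × Int) (end_ : Int × Int), Dom_month_iter start end_ → Pre_month_iter start end_ → Spec_month_iter start end_ (month_iter start end_)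

-- ===== LEMMAS AND PROOFS =====

lemma decode_idx (y m : Int) (h1 : 1 ≤ m) (h2 : m ≤ 12) :
    (PySem.Int.floordiv (y * 12 + m - 1) 12, PySem.Int.mod (y * 12 + m - 1) 12 + 1)
      = (y, m) := by
  have hd : PySem.Int.floordiv (y * 12 + m - 1) 12 = y := by
    rw [PySem.Int.floordiv_eq_iff_of_pos (by norm_num)]; omega
  have hm := PySem.Int.floordiv_mul_add_mod (y * 12 + m - 1) 12
  rw [hd] at hm
  have : PySem.Int.mod (y * 12 + m - 1) 12 = m - 1 := by omega
  rw [hd, this]; norm_num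

lemma monthLoopA_eq (n : Nat) (ey em : Int) (hem1 : 1 ≤ em) (hem2 : em ≤ 12) :
    ∀ (y m : Int), 1 ≤ m → m ≤ 12 →
      n = (ey * 12 + em - (y * 12 + m) + 1).toNat →
      monthLoopA n y m ey em
        = (PySem.List.pyRange (y * 12 + m - 1) (ey * 12 + em - 1 + 1) 1).map
            (fun i => (PySem.Int.floordiv i 12, PySem.Int.mod i 12 + 1)) := by
  induction n with
  | zero =>
    intro y m hm1 hm2 hn
    have : ey * 12 + em - 1 + 1 ≤ y * 12 + m - 1 := by omega
    rw [PySem.List.pyRange_one_eq_nil this]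
    rfl
  | succ n ih =>
    intro y m hm1 hm2 hn
    have hcond : y < ey ∨ (y = ey ∧ m ≤ em) := by omega
    have hle : y * 12 + m ≤ ey * 12 + em := by omega
    rw [PySem.List.pyRange_one_cons (by omega : y * 12 + m - 1 < ey * 12 + em - 1 + 1)]
    simp only [List.map_cons, decode_idx y m hm1 hm2]
    rw [monthLoopA, if_pos hcond]
    by_cases h12 : m + 1 = 13
    · rw [if_pos h12]
      have := ih (y + 1) 1 (by omega) (by omega) (by omega)
      rw [this]
      have : y * 12 + m - 1 + 1 = (y + 1) * 12 + 1 - 1 := by omega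
      rw [this]
    · rw [if_neg h12]
      have := ih y (m + 1) (by omega) (by omega) (by omega)
      rw [this]
      have : y * 12 + m - 1 + 1 = y * 12 + (m + 1) - 1 := by omega
      rw [this]

-- ===== VERDICT (by name: the statement is the Claim_ definition above) =====
theorem month_iter_spec : Claim_equal_month_iter := by
  intro start end_ _ hpre
  unfold Spec_month_iter month_iter month_iter_alt
  rcases hpre with ⟨h1, h2, h3, h4⟩ | ⟨_, hidx⟩
  · exact monthLoopA_eq _ end_.1 end_.2 h3 h4 start.1 start.2 h1 h2 rfl
  · have hf : (end_.1 * 12 + end_.2 - (start.1 * 12 + start.2) + 1).toNat = 0 := by omega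
    simp only [hf,
      PySem.List.pyRange_one_eq_nil
        (by omega : end_.1 * 12 + end_.2 - 1 + 1 ≤ start.1 * 12 + start.2 - 1)]
    rfl
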